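-- pv_equiv track=rewrite | github.com/AleksandraYanum/Stepik_Python_Advanced | 10_dictionary/10_4_dictionary_tasks/4_synonym_dictionary.py | find_synonym
-- ===== SOURCE A (Python) =====
-- def find_synonym(synonyms, input_word):
--     input_word_synonym = ''
--
--     for word, synonym in synonyms.items():
--         if input_word == word:
--             input_word_synonym = synonym
--             break
--         elif input_word == synonym:
--             input_word_synonym = word
--             break
--
--     return input_word_synonym
-- ===== SOURCE B (Python) =====
-- def find_synonym(synonyms, input_word):
--     lookup = {}
--     for word, synonym in synonyms.items():
--         lookup.setdefault(word, synonym)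
--         lookup.setdefault(synonym, word)
--     return lookup.get(input_word, '')
-- ===== Notes on version B (the rewrite author's own statement) =====
-- stated objective: alternative
-- what changed: Instead of scanning entries with an early break and branching on key vs value, B builds one bidirectional lookup table with setdefault (key then value, so the earliest match wins) and answers with a single dict get.
import Mathlib
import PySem

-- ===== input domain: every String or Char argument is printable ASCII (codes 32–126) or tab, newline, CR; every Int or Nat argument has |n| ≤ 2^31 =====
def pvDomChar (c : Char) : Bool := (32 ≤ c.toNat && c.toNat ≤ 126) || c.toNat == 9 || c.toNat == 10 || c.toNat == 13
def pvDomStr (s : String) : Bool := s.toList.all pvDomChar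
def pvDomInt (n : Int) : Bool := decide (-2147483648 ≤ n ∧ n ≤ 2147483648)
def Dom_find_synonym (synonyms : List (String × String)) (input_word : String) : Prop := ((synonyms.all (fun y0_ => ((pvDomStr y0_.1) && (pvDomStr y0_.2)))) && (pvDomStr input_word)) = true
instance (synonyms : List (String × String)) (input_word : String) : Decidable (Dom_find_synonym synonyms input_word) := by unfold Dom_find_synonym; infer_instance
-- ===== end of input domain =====

-- B replaces A's break-on-first-match scan with a bidirectional setdefault lookup table
-- queried once (alternative decomposition; same O(n) cost).
-- ===== PORT A =====
-- Port of A: scan the items, breaking at the first key or value match.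
def find_synonym (synonyms : List (String × String)) (input_word : String) : String :=
  match synonyms with
  | [] => ""
  | (word, synonym) :: rest =>
    if input_word == word then synonym
    else if input_word == synonym then word
    else find_synonym rest input_word

-- ===== PORT B =====
-- Port of B: build a bidirectional lookup dict with setdefault, then one get.
def find_synonym_alt (synonyms : List (String × String)) (input_word : String) : String :=
  (synonyms.foldl
    (fun lookup p => (lookup.setdefault p.1 p.2).setdefault p.2 p.1)
    PySem.Dict.empty).getD input_word ""

-- ===== PRECONDITION & SPEC =====
def Spec_find_synonym (synonyms : List (String × String)) (input_word : String) (out : String) : Prop := out = find_synonym_alt synonyms input_word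
instance (synonyms : List (String × String)) (input_word : String) (out : String) : Decidable (Spec_find_synonym synonyms input_word out) := by unfold Spec_find_synonym; infer_instance

-- ===== CLAIM (what is proved, stated in full; the proofs are below) =====
def Claim_equal_find_synonym : Prop := ∀ (synonyms : List (String × String)) (input_word : String), Dom_find_synonym synonyms input_word → Spec_find_synonym synonyms input_word (find_synonym synonyms input_word)

-- ===== LEMMAS AND PROOFS =====

-- setdefault at a different key leaves a lookup unchanged (any default).
lemma sd_getD_ne (d : PySem.Dict String String) (k v w d0 : String) (h : ¬ w = k) :
    (d.setdefault k v).getD w d0 = d.getD w d0 := by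
  simp [PySem.Dict.getD_eq_get?_getD, PySem.Dict.get?_setdefault_of_ne, h]

-- a key that is present ignores the lookup default
lemma getD_of_contains (d : PySem.Dict String String) (w a b : String)
    (h : d.contains w = true) : d.getD w a = d.getD w b := by
  rw [PySem.Dict.contains_eq_isSome_get?] at h
  obtain ⟨x, hx⟩ := Option.isSome_iff_exists.mp h
  simp [PySem.Dict.getD_eq_get?_getD, hx]

-- an absent key yields the lookup default
lemma getD_nc (d : PySem.Dict String String) (w a : String)
    (h : d.contains w = false) : d.getD w a = a := by
  rw [PySem.Dict.contains_eq_isSome_get?] at h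
  cases h2 : d.get? w with
  | none => simp [PySem.Dict.getD_eq_get?_getD, h2]
  | some x => rw [h2] at h; simp at h

-- Invariant of B's build loop: a lookup in the finished dict is the value already
-- present in the accumulator, or else what A's scan of the remaining entries finds.
lemma fold_getD (synonyms : List (String × String)) (w : String)
    (d : PySem.Dict String String) :
    (synonyms.foldl (fun lookup p => (lookup.setdefault p.1 p.2).setdefault p.2 p.1) d).getD w ""
      = if d.contains w then d.getD w "" else find_synonym synonyms w := by
  induction synonyms generalizing d with
  | nil =>
    simp only [List.foldl_nil, find_synonym]
    split
    · rfl
    · next h => exact getD_nc d w "" (Bool.not_eq_true _ ▸ h)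
  | cons p rest ih =>
    obtain ⟨k, v⟩ := p
    rw [List.foldl_cons, ih, find_synonym]
    simp only [PySem.Dict.contains_setdefault]
    by_cases hd : d.contains w = true
    · -- w already bound: both setdefaults leave its binding alone
      simp only [hd, Bool.or_true, if_true]
      by_cases hv : w = v
      · subst hv
        rw [PySem.Dict.getD_setdefault_self]
        by_cases hk : w = k
        · subst hk
          rw [PySem.Dict.getD_setdefault_self]
          exact getD_of_contains d w w "" hd
        · rw [sd_getD_ne d k w w k hk]
          exact getD_of_contains d w k "" hd
      · rw [sd_getD_ne _ v k w "" hv]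
        by_cases hk : w = k
        · subst hk
          rw [PySem.Dict.getD_setdefault_self]
          exact getD_of_contains d w v "" hd
        · rw [sd_getD_ne d k v w "" hk]
    · -- w not yet bound: the entry (k, v) decides, exactly like A's two comparisons
      have hd' : d.contains w = false := Bool.not_eq_true _ ▸ hd
      simp only [hd, Bool.or_false]
      by_cases hk : w = k
      · subst hk
        simp only [beq_self_eq_true, Bool.or_true, if_true]
        by_cases hv : w = v
        · subst hv
          rw [PySem.Dict.setdefault_of_not_contains _ _ hd',
            PySem.Dict.setdefault_of_contains _ _ (PySem.Dict.contains_insert_self d w w),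
            PySem.Dict.getD_insert_self]
          simp
        · rw [sd_getD_ne _ v w w "" hv,
            PySem.Dict.setdefault_of_not_contains _ _ hd',
            PySem.Dict.getD_insert_self]
          simp
      · have hkb : (w == k) = false := beq_eq_false_iff_ne.mpr hk
        by_cases hv : w = v
        · subst hv
          simp only [beq_self_eq_true, Bool.true_or, if_true, hkb]
          rw [PySem.Dict.getD_setdefault_self, sd_getD_ne d k w w k hk]
          exact getD_nc d w k hd'
        · have hvb : (w == v) = false := beq_eq_false_iff_ne.mpr hv
          simp only [hkb, hvb, Bool.false_or]
          simp

-- ===== VERDICT (by name: the statement is the Claim_ definition above) =====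
theorem find_synonym_spec : Claim_equal_find_synonym := by
  intro synonyms input_word _
  unfold Spec_find_synonym find_synonym_alt
  rw [fold_getD]
  simp [PySem.Dict.empty]
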